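-- pv_equiv track=rewrite | github.com/Stanis96/gpb_tasks | task_1.py | find_unique_records
-- ===== SOURCE A (Python) =====
-- def find_unique_records(data: list) -> tuple[list[dict[str, str]], set]:
--     u_set = set()
--     d_set = set()
--     res_list = list()
--     for record in data:
--         record_id = record["id"]
--         if record_id not in u_set:
--             u_set.add(record_id)
--             res_list.append(record)
--         else:
--             d_set.add(record_id)
--     return res_list, d_set
-- ===== SOURCE B (Python) =====
-- def find_unique_records(data: list) -> tuple[list[dict[str, str]], set]:
--     ids = [record["id"] for record in data]
--     res_list = [record for i, (record, rid) in enumerate(zip(data, ids)) if rid not in ids[:i]]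
--     d_set = {rid for i, rid in enumerate(ids) if rid in ids[:i]}
--     return res_list, d_set
-- ===== Notes on version B (the rewrite author's own statement) =====
-- stated objective: alternative
-- what changed: Replaces A's stateful single pass with two membership sets by a staged, state-free formulation: the id column is extracted once, then a record is kept iff its id does not occur among the earlier ids (prefix membership ids[:i]) and the duplicate set is the ids that do occur earlier; no seen-set is maintained.
import Mathlib
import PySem

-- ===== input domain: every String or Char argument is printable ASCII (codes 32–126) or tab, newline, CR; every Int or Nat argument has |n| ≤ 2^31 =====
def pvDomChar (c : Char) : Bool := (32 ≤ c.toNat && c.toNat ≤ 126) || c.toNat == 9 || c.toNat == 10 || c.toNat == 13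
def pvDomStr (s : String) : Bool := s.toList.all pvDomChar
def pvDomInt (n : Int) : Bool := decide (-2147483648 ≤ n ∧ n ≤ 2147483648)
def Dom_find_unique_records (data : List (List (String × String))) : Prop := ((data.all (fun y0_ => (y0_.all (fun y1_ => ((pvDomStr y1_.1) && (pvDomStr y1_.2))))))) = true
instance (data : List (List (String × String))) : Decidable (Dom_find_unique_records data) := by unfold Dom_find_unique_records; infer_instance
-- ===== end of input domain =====

-- B replaces A's stateful seen-set pass by staged prefix-membership comprehensions over the extracted id column (alternative decomposition; not faster).


-- ===== PORT A =====
-- state = (u_set, d_set, res_list); record["id"] missing = KeyError, excluded by Pre_ (the 'none' arm is never reached there)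
def find_unique_records (data : List (List (String × String))) : (List (List (String × String))) × List String :=
  let st := data.foldl
    (fun (st : PySem.Set String × PySem.Set String × List (List (String × String))) record =>
      match (PySem.Dict.mk record).get? "id" with
      | none => st
      | some record_id =>
        if PySem.Set.contains st.1 record_id = false then
          (PySem.Set.add st.1 record_id, st.2.1, st.2.2 ++ [record])
        else
          (st.1, PySem.Set.add st.2.1 record_id, st.2.2))
    (PySem.Set.empty, PySem.Set.empty, [])
  (st.2.2, st.2.1)

-- ===== PORT B =====
-- ids carries Option String (none = the KeyError Python raises while building ids, excluded by Pre_);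
-- ids[:i] with i ≥ 0 is List.take i; the set comprehension is PySem.Set.ofList of the second-occurrence ids in order.
def find_unique_records_alt (data : List (List (String × String))) : (List (List (String × String))) × List String :=
  let ids := data.map (fun record => (PySem.Dict.mk record).get? "id")
  let res_list := ((PySem.List.enumerate (data.zip ids)).filter
      (fun p => !((ids.take p.1.toNat).contains p.2.2))).map (fun p => p.2.1)
  let d_set := PySem.Set.ofList ((PySem.List.enumerate ids).filterMap
      (fun p => match p.2 with
        | some rid => if (ids.take p.1.toNat).contains (some rid) then some rid else none
        | none => none))
  (res_list, d_set)

-- ===== PRECONDITION & SPEC =====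
-- Pre_ excludes exactly the inputs where A raises KeyError (a record without an "id" key); B raises there too.
def Pre_find_unique_records (data : List (List (String × String))) : Prop :=
  ∀ record ∈ data, ((PySem.Dict.mk record).get? "id").isSome = true
instance (data : List (List (String × String))) : Decidable (Pre_find_unique_records data) := by unfold Pre_find_unique_records; infer_instance
def pvWitness_find_unique_records : (List (List (String × String))) :=
  [[("id", "1"), ("v", "x")], [("id", "2")], [("id", "1")]]
def Spec_find_unique_records (data : List (List (String × String))) (out : (List (List (String × String))) × List String) : Prop := out = find_unique_records_alt data
instance (data : List (List (String × String))) (out : (List (List (String × String))) × List String) : Decidable (Spec_find_unique_records data out) := by unfold Spec_find_unique_records; infer_instance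

-- ===== CLAIM (what is proved, stated in full; the proofs are below) =====
def Claim_equal_find_unique_records : Prop := ∀ (data : List (List (String × String))), Dom_find_unique_records data → Pre_find_unique_records data → Spec_find_unique_records data (find_unique_records data)

-- ===== LEMMAS AND PROOFS =====

-- the loop body of port A, named for the proofs (definitionally the lambda in the port)
def pvStepA (st : PySem.Set String × PySem.Set String × List (List (String × String)))
    (record : List (String × String)) :
    PySem.Set String × PySem.Set String × List (List (String × String)) :=
  match (PySem.Dict.mk record).get? "id" with
  | none => st
  | some record_id =>
    if PySem.Set.contains st.1 record_id = false then
      (PySem.Set.add st.1 record_id, st.2.1, st.2.2 ++ [record])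
    else
      (st.1, PySem.Set.add st.2.1 record_id, st.2.2)

-- B's three stages, named
def pvIds (data : List (List (String × String))) : List (Option String) :=
  data.map (fun record => (PySem.Dict.mk record).get? "id")

def pvRes (data : List (List (String × String))) : List (List (String × String)) :=
  ((PySem.List.enumerate (data.zip (pvIds data))).filter
      (fun p => !(((pvIds data).take p.1.toNat).contains p.2.2))).map (fun p => p.2.1)

def pvRaw (data : List (List (String × String))) : List String :=
  (PySem.List.enumerate (pvIds data)).filterMap
      (fun p => match p.2 with
        | some rid => if ((pvIds data).take p.1.toNat).contains (some rid) then some rid else none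
        | none => none)

theorem pvAlt_eq (data : List (List (String × String))) :
    find_unique_records_alt data = (pvRes data, PySem.Set.ofList (pvRaw data)) := rfl

theorem pvIds_append (xs : List (List (String × String))) (r : List (String × String)) :
    pvIds (xs ++ [r]) = pvIds xs ++ [(PySem.Dict.mk r).get? "id"] := by
  simp [pvIds]

theorem pvRes_append (xs : List (List (String × String))) (r : List (String × String)) :
    pvRes (xs ++ [r]) = pvRes xs
      ++ (if (pvIds xs).contains ((PySem.Dict.mk r).get? "id") then [] else [r]) := by
  have hlen : xs.length = (pvIds xs).length := by simp [pvIds]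
  unfold pvRes
  rw [pvIds_append, List.zip_append hlen, PySem.List.enumerate_append, List.filter_append,
    List.map_append]
  congr 1
  · apply congrArg (List.map _)
    apply List.filter_congr
    intro p hp
    obtain ⟨k, hk, rfl⟩ := (PySem.List.mem_enumerate_iff _ _ _).mp hp
    have hk' : k ≤ (pvIds xs).length := by
      rw [List.length_zip] at hk
      omega
    simp only [zero_add, Int.toNat_natCast]
    rw [List.take_append_of_le_length hk']
  · simp only [List.zip_cons_cons, List.zip_nil_left]
    rw [show PySem.List.enumerate [(r, (PySem.Dict.mk r).get? "id")]
          (0 + ((xs.zip (pvIds xs)).length : Int))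
        = [((((xs.zip (pvIds xs)).length : Int)), (r, (PySem.Dict.mk r).get? "id"))] by
      simp [PySem.List.enumerate]]
    have hzlen : (xs.zip (pvIds xs)).length = (pvIds xs).length := by
      simp [pvIds]
    simp only [List.filter_cons, List.filter_nil]
    rw [show (((xs.zip (pvIds xs)).length : Int)).toNat = (pvIds xs).length by
      simp [hzlen]]
    rw [List.take_left]
    by_cases hcon : (PySem.Dict.mk r).get? "id" ∈ pvIds xs
    · simp [hcon]
    · simp [hcon]

theorem pvRaw_append (xs : List (List (String × String))) (r : List (String × String)) :
    pvRaw (xs ++ [r]) = pvRaw xs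
      ++ (match (PySem.Dict.mk r).get? "id" with
          | some rid => if (pvIds xs).contains (some rid) then [rid] else []
          | none => []) := by
  unfold pvRaw
  rw [pvIds_append, PySem.List.enumerate_append, List.filterMap_append]
  congr 1
  · apply List.filterMap_congr
    intro p hp
    obtain ⟨k, hk, rfl⟩ := (PySem.List.mem_enumerate_iff _ _ _).mp hp
    have hk' : k ≤ (pvIds xs).length := le_of_lt hk
    simp only [zero_add, Int.toNat_natCast]
    rw [List.take_append_of_le_length hk']
  · rw [show PySem.List.enumerate [(PySem.Dict.mk r).get? "id"] (0 + ((pvIds xs).length : Int))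
        = [((((pvIds xs).length : Int)), (PySem.Dict.mk r).get? "id")] by
      simp [PySem.List.enumerate]]
    simp only [List.filterMap_cons, List.filterMap_nil]
    rw [show (((pvIds xs).length : Int)).toNat = (pvIds xs).length by simp]
    rw [List.take_left]
    cases hrid : (PySem.Dict.mk r).get? "id" with
    | none => rfl
    | some rid =>
      by_cases hcon : some rid ∈ pvIds xs
      · simp [hcon]
      · simp [hcon]

theorem pvMain (data : List (List (String × String)))
    (hpre : Pre_find_unique_records data) :
    (data.foldl pvStepA (PySem.Set.empty, PySem.Set.empty, [])).2.2 = pvRes data ∧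
    (data.foldl pvStepA (PySem.Set.empty, PySem.Set.empty, [])).2.1
        = PySem.Set.ofList (pvRaw data) ∧
    (∀ x : String,
      PySem.Set.contains (data.foldl pvStepA (PySem.Set.empty, PySem.Set.empty, [])).1 x = true
        ↔ some x ∈ pvIds data) := by
  induction data using List.reverseRecOn with
  | nil =>
    refine ⟨rfl, rfl, fun x => ?_⟩
    simp [pvIds, PySem.Set.empty, PySem.Set.contains]
  | append_singleton xs r ih =>
    have hxs : Pre_find_unique_records xs := fun rec h => hpre rec (by simp [h])
    obtain ⟨h1, h2, h3⟩ := ih hxs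
    obtain ⟨rid, hrid⟩ := Option.isSome_iff_exists.mp (hpre r (by simp))
    rw [List.foldl_append, pvRes_append, pvRaw_append, pvIds_append, hrid]
    set s := xs.foldl pvStepA ((PySem.Set.empty : PySem.Set String),
      (PySem.Set.empty : PySem.Set String), ([] : List (List (String × String)))) with hs
    have hstep : List.foldl pvStepA s [r] = pvStepA s r := rfl
    rw [hstep]
    unfold pvStepA
    rw [hrid]
    dsimp only
    by_cases hc : PySem.Set.contains s.1 rid = false
    · have hnot : ¬ some rid ∈ pvIds xs := by
        intro hm
        have := (h3 rid).mpr hm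
        rw [hc] at this
        exact Bool.false_ne_true this
      have hcon : (pvIds xs).contains (some rid) = false := by
        rw [← Bool.not_eq_true, List.contains_iff_mem]
        exact hnot
      rw [if_pos hc, hcon]
      refine ⟨by simpa using h1, by simpa using h2, fun x => ?_⟩
      rw [PySem.Set.contains_iff, PySem.Set.mem_add]
      constructor
      · rintro (hmem | rfl)
        · exact List.mem_append_left _ ((h3 x).mp ((PySem.Set.contains_iff _ x).mpr hmem))
        · exact List.mem_append_right _ (List.mem_singleton.mpr rfl)
      · intro hmem
        rcases List.mem_append.mp hmem with hmem | hmem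
        · exact Or.inl ((PySem.Set.contains_iff _ x).mp ((h3 x).mpr hmem))
        · exact Or.inr (Option.some_inj.mp (List.mem_singleton.mp hmem))
    · have hct : PySem.Set.contains s.1 rid = true := by
        cases h : PySem.Set.contains s.1 rid with
        | false => exact absurd h hc
        | true => rfl
      have hmem : some rid ∈ pvIds xs := (h3 rid).mp hct
      have hcon : (pvIds xs).contains (some rid) = true := List.contains_iff_mem.mpr hmem
      rw [if_neg hc, hcon]
      refine ⟨by simpa using h1, ?_, fun x => ?_⟩
      · rw [h2, if_pos rfl, PySem.Set.ofList_append_singleton]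
      · rw [h3 x, List.mem_append, List.mem_singleton]
        constructor
        · exact Or.inl
        · rintro (hm | hm)
          · exact hm
          · exact Option.some_inj.mp hm ▸ hmem

-- ===== VERDICT (by name: the statement is the Claim_ definition above) =====
theorem find_unique_records_spec : Claim_equal_find_unique_records := by
  intro data _ hpre
  unfold Spec_find_unique_records
  rw [pvAlt_eq]
  obtain ⟨h1, h2, -⟩ := pvMain data hpre
  show ((data.foldl pvStepA (PySem.Set.empty, PySem.Set.empty, [])).2.2,
        (data.foldl pvStepA (PySem.Set.empty, PySem.Set.empty, [])).2.1)
      = (pvRes data, PySem.Set.ofList (pvRaw data))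
  rw [h1, h2]
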